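-- pv_equiv track=rewrite | github.com/Debjit-Dhar/DSA-OOPs-and-Scripting-in-Python | DSA and OOPs and Scripting/researchlab2.py | rpeak
-- ===== SOURCE A (Python) =====
-- def rpeak(lst):
--     result = [0] * len(lst)
--     i = 0
--
--     while i < len(lst):
--         # Skip consecutive zeros
--         while i < len(lst) and lst[i] == 0:
--             i += 1
--
--         if i < len(lst):
--             # Found the start of a non-zero sequence
--             start = i
--             max_val = lst[i]
--
--             # Find the maximum value in the non-zero sequence
--             while i < len(lst) and lst[i] != 0:
--                 max_val = max(max_val, lst[i])
--                 i += 1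
--
--             # Set all values in the sequence to zero except the maximum value
--             for j in range(start, i):
--                 if lst[j] != max_val:
--                     result[j] = 0
--                 else:
--                     result[j] = max_val
--
--     return result
-- ===== SOURCE B (Python) =====
-- def rpeak(lst):
--     # Pass 1: label each position by its run id (= zeros seen so far) and
--     # record each run's maximum in a dict keyed by run id.
--     run_max = {}
--     rid = 0
--     for v in lst:
--         if v == 0:
--             rid += 1
--         elif rid not in run_max or v > run_max[rid]:
--             run_max[rid] = v
--     # Pass 2: emit v only where it equals its run's recorded maximum.
--     out = []
--     rid = 0
--     for v in lst:
--         if v == 0: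
--             rid += 1
--             out.append(0)
--         else:
--             out.append(v if v == run_max[rid] else 0)
--     return out
-- ===== Notes on version B (the rewrite author's own statement) =====
-- stated objective: alternative
-- what changed: A's in-place index walk (skip zeros, rescan the run for its max, then write it back over range(start,i)) is replaced by two staged whole-list passes with a hash index: pass 1 labels every position with a run id (the count of zeros seen) and builds a dict run-id -> run maximum; pass 2 maps each element by a single dict lookup, so no run is ever buffered, rescanned or written back by index.
import Mathlib
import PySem

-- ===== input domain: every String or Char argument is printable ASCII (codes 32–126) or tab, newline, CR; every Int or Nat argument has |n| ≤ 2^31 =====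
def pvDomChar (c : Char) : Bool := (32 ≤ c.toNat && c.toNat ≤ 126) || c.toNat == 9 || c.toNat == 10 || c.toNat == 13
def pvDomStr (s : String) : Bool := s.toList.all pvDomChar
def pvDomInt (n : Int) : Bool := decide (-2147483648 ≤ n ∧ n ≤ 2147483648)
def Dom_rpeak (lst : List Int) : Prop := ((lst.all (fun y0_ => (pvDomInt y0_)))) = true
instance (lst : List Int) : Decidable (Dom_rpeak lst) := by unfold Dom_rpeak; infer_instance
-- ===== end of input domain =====

-- B replaces A's in-place index walk over a preallocated array by two staged passes with a
-- dict: pass 1 labels positions by run id (zeros seen so far) and records each run's max,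
-- pass 2 maps every element by one dict lookup; objective: alternative, same O(n) cost.

-- ===== PORT A =====
-- inner `while i < len(lst) and lst[i] == 0: i += 1`
def skipZeros (lst : List Int) (i : Nat) : Nat :=
  if h : i < lst.length ∧ lst.getD i 0 = 0 then skipZeros lst (i + 1) else i
termination_by lst.length - i
decreasing_by exact Nat.sub_succ_lt_self _ _ h.1

-- inner `while i < len(lst) and lst[i] != 0: max_val = max(max_val, lst[i]); i += 1`
def findMax (lst : List Int) (i : Nat) (m : Int) : Nat × Int :=
  if h : i < lst.length ∧ lst.getD i 0 ≠ 0 then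
    findMax lst (i + 1) (max m (lst.getD i 0))
  else (i, m)
termination_by lst.length - i
decreasing_by exact Nat.sub_succ_lt_self _ _ h.1

-- `for j in range(start, i): result[j] = 0 if lst[j] != max_val else max_val`
def setRun (result lst : List Int) (j stop : Nat) (m : Int) : List Int :=
  if h : j < stop then
    setRun (result.set j (if lst.getD j 0 ≠ m then 0 else m)) lst (j + 1) stop m
  else result
termination_by stop - j
decreasing_by exact Nat.sub_succ_lt_self _ _ h

-- these two facts are cited by the outer loop's decreasing_by (termination only)
theorem skipZeros_ge (lst : List Int) (i : Nat) : i ≤ skipZeros lst i := by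
  fun_induction skipZeros with
  | case1 i h ih => exact Nat.le_of_succ_le ih
  | case2 i h => exact Nat.le_refl i

theorem skipZeros_stop (lst : List Int) (i : Nat) :
    skipZeros lst i < lst.length → lst.getD (skipZeros lst i) 0 ≠ 0 := by
  fun_induction skipZeros with
  | case1 i hcond ih => exact ih
  | case2 i hcond => intro h hz; exact hcond ⟨h, hz⟩

theorem findMax_ge (lst : List Int) (j : Nat) (m : Int) : j ≤ (findMax lst j m).1 := by
  fun_induction findMax with
  | case1 i m h ih => exact Nat.le_of_succ_le ih
  | case2 i m h => exact Nat.le_refl i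

theorem findMax_fst_gt (lst : List Int) (i : Nat) (m : Int)
    (h : i < lst.length) (hnz : lst.getD i 0 ≠ 0) : i < (findMax lst i m).1 := by
  rw [findMax, dif_pos ⟨h, hnz⟩]
  exact Nat.lt_of_lt_of_le (Nat.lt_succ_self i) (findMax_ge lst (i + 1) _)

-- outer `while i < len(lst): …` (start = skipZeros lst i, (i', max_val) = findMax …)
def rpeakLoop (lst result : List Int) (i : Nat) : List Int :=
  if _h : i < lst.length then
    if _h2 : skipZeros lst i < lst.length then
      rpeakLoop lst
        (setRun result lst (skipZeros lst i)
          (findMax lst (skipZeros lst i) (lst.getD (skipZeros lst i) 0)).1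
          (findMax lst (skipZeros lst i) (lst.getD (skipZeros lst i) 0)).2)
        (findMax lst (skipZeros lst i) (lst.getD (skipZeros lst i) 0)).1
    else result
  else result
termination_by lst.length - i
decreasing_by
  exact Nat.sub_lt_sub_left _h
    (Nat.lt_of_le_of_lt (skipZeros_ge lst i)
      (findMax_fst_gt lst (skipZeros lst i) (lst.getD (skipZeros lst i) 0) _h2
        (skipZeros_stop lst i _h2)))

def rpeak (lst : List Int) : List Int :=
  rpeakLoop lst (List.replicate lst.length 0) 0

-- ===== PORT B =====
-- pass-1 loop body: `if v == 0: rid += 1  elif rid not in run_max or v > run_max[rid]: run_max[rid] = v`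
-- (`run_max[rid]` on the elif is only evaluated when the key is present, so getD 0 is exact there)
def buildStep (st : PySem.Dict Int Int × Int) (v : Int) : PySem.Dict Int Int × Int :=
  if v = 0 then (st.1, st.2 + 1)
  else if !(st.1.contains st.2) || st.1.getD st.2 0 < v then (st.1.insert st.2 v, st.2)
  else st

-- pass-2 loop body: `if v == 0: rid += 1; out.append(0) else: out.append(v if v == run_max[rid] else 0)`
-- (`run_max[rid]` is ported as getD 0: whenever Python reaches it, pass 1 has inserted the key, so exact)
def mapStep (d : PySem.Dict Int Int) (st : List Int × Int) (v : Int) : List Int × Int :=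
  if v = 0 then (st.1 ++ [0], st.2 + 1)
  else (st.1 ++ [if v = d.getD st.2 0 then v else 0], st.2)

def rpeak_alt (lst : List Int) : List Int :=
  let d := (lst.foldl buildStep (PySem.Dict.empty, 0)).1
  (lst.foldl (mapStep d) ([], 0)).1

-- ===== PRECONDITION & SPEC =====
def Spec_rpeak (lst : List Int) (out : List Int) : Prop := out = rpeak_alt lst
instance (lst : List Int) (out : List Int) : Decidable (Spec_rpeak lst out) := by unfold Spec_rpeak; infer_instance

-- ===== CLAIM (what is proved, stated in full; the proofs are below) =====
def Claim_equal_rpeak : Prop := ∀ (lst : List Int), Dom_rpeak lst → Spec_rpeak lst (rpeak lst)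

-- ===== LEMMAS AND PROOFS =====

-- common reference form: process the list run by run
def goAlt : List Int → List Int
  | [] => []
  | x :: xs =>
    if x = 0 then
      (0 :: List.takeWhile (fun v => v == 0) xs) ++ goAlt (List.dropWhile (fun v => v == 0) xs)
    else
      let tw := List.takeWhile (fun v => !(v == 0)) xs
      let m := List.foldl max x tw
      ((x :: tw).map (fun v => if v = m then m else 0)) ++
        goAlt (List.dropWhile (fun v => !(v == 0)) xs)
termination_by l => l.length
decreasing_by
  · exact Nat.lt_succ_of_le (List.length_dropWhile_le _ _)
  · exact Nat.lt_succ_of_le (List.length_dropWhile_le _ _)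

theorem goAlt_nil : goAlt [] = [] := by rw [goAlt]

theorem goAlt_run (l : List Int) :
    goAlt l = List.takeWhile (fun v : Int => v == 0) l ++
      goAlt (List.dropWhile (fun v : Int => v == 0) l) := by
  match l with
  | [] => simp [goAlt]
  | x :: xs =>
    by_cases hx : x = 0
    · subst hx
      rw [goAlt]
      simp
    · simp [hx]

theorem goAlt_zero_cons (t : List Int) : goAlt (0 :: t) = 0 :: goAlt t := by
  rw [goAlt]
  norm_num
  exact (goAlt_run t).symm

theorem goAlt_replicate (n : Nat) : goAlt (List.replicate n 0) = List.replicate n 0 := by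
  induction n with
  | zero => simp [goAlt_nil]
  | succ k ih => simp [List.replicate_succ, goAlt_zero_cons, ih]

-- ---- A side ----

theorem skipZeros_eq (lst : List Int) (i : Nat) :
    skipZeros lst i = i + ((lst.drop i).takeWhile (fun v => v == 0)).length := by
  fun_induction skipZeros with
  | case1 i hcond ih =>
    obtain ⟨hlt, hz⟩ := hcond
    rw [List.drop_eq_getElem_cons hlt, List.takeWhile_cons]
    have hx : lst[i] = 0 := by rwa [List.getD_eq_getElem lst 0 hlt] at hz
    simp only [hx]
    norm_num
    omega
  | case2 i hcond =>
    by_cases hlt : i < lst.length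
    · have hz : ¬ lst[i] = 0 := fun hx => hcond ⟨hlt, by rwa [List.getD_eq_getElem lst 0 hlt]⟩
      rw [List.drop_eq_getElem_cons hlt, List.takeWhile_cons]
      simp [hz]
    · rw [List.drop_of_length_le (by omega)]
      simp

theorem findMax_eq (lst : List Int) (i : Nat) (m : Int) :
    findMax lst i m =
      (i + ((lst.drop i).takeWhile (fun v => !(v == 0))).length,
       ((lst.drop i).takeWhile (fun v => !(v == 0))).foldl max m) := by
  fun_induction findMax with
  | case1 i m hcond ih =>
    obtain ⟨hlt, hz⟩ := hcond
    have hg : lst.getD i 0 = lst[i] := List.getD_eq_getElem lst 0 hlt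
    have hx : ¬ lst[i] = 0 := by rwa [hg] at hz
    rw [hg] at ih
    rw [List.drop_eq_getElem_cons hlt, List.takeWhile_cons]
    norm_num [hx, List.getElem?_eq_getElem hlt]
    rw [ih]
    simp only [Prod.mk.injEq]
    refine ⟨by omega, ?_⟩
    simp
  | case2 i m hcond =>
    by_cases hlt : i < lst.length
    · have hz : lst[i] = 0 := by
        by_contra hx
        exact hcond ⟨hlt, by rwa [List.getD_eq_getElem lst 0 hlt]⟩
      rw [List.drop_eq_getElem_cons hlt, List.takeWhile_cons]
      simp [hz]
    · rw [List.drop_of_length_le (by omega)]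
      simp

theorem setRun_eq (n : Nat) : ∀ (res lst : List Int) (j : Nat) (m : Int),
    j + n ≤ res.length → j + n ≤ lst.length →
    setRun res lst j (j + n) m =
      res.take j ++ ((lst.drop j).take n).map (fun v => if v ≠ m then 0 else m) ++
        res.drop (j + n) := by
  induction n with
  | zero =>
    intro res lst j m _ _
    rw [setRun, dif_neg (by omega)]
    simp [List.take_append_drop]
  | succ k ih =>
    intro res lst j m hres hlst
    have hjr : j < res.length := by omega
    have hjl : j < lst.length := by omega
    rw [setRun, dif_pos (by omega)]
    rw [show j + (k + 1) = (j + 1) + k from by omega]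
    rw [ih (res.set j (if lst.getD j 0 ≠ m then 0 else m)) lst (j + 1) m
      (by simpa using by omega) (by omega)]
    rw [List.set_eq_take_append_cons_drop, if_pos hjr]
    have h1 : (res.take j ++ (if lst.getD j 0 ≠ m then 0 else m) :: res.drop (j + 1)).take (j + 1)
        = res.take j ++ [if lst.getD j 0 ≠ m then 0 else m] := by
      rw [List.take_append]
      have : (res.take j).length = j := by simp; omega
      rw [this, List.take_take]
      simp
    have h2 : (res.take j ++ (if lst.getD j 0 ≠ m then 0 else m) :: res.drop (j + 1)).drop (j + 1 + k)
        = res.drop (j + 1 + k) := by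
      rw [List.drop_append]
      have hl : (res.take j).length = j := by simp; omega
      rw [hl, List.drop_of_length_le (l := res.take j) (by omega)]
      rw [show j + 1 + k - j = k + 1 from by omega]
      simp [List.drop_drop]
    rw [h1, h2]
    have h3 : (lst.drop j).take (k + 1)
        = lst.getD j 0 :: (lst.drop (j + 1)).take k := by
      rw [List.getD_eq_getElem lst 0 hjl]
      conv_lhs => rw [List.drop_eq_getElem_cons hjl, List.take_succ_cons]
    rw [h3]
    simp [List.append_assoc]

theorem rpeakLoop_eq (lst : List Int) (k : Nat) : ∀ (res : List Int) (i : Nat),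
    lst.length - i ≤ k → res.length = lst.length →
    res.drop i = List.replicate (lst.length - i) 0 →
    rpeakLoop lst res i = res.take i ++ goAlt (lst.drop i) := by
  induction k with
  | zero =>
    intro res i hk hlen hdrop
    rw [rpeakLoop, dif_neg (by omega)]
    rw [List.drop_of_length_le (by omega), goAlt_nil, List.append_nil,
      List.take_of_length_le (by omega)]
  | succ k ih =>
    intro res i hk hlen hdrop
    by_cases hi : i < lst.length
    case neg =>
      rw [rpeakLoop, dif_neg hi]
      rw [List.drop_of_length_le (by omega), goAlt_nil, List.append_nil,
        List.take_of_length_le (by omega)]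
    case pos =>
    have hsz : skipZeros lst i = i + ((lst.drop i).takeWhile (fun v => v == 0)).length :=
      skipZeros_eq lst i
    set k0 := ((lst.drop i).takeWhile (fun v => v == 0)).length with hk0def
    have hk0le : k0 ≤ lst.length - i := by
      have h := (List.takeWhile_prefix (l := lst.drop i) (fun v : Int => v == 0)).length_le
      rw [List.length_drop] at h
      exact h
    have htw : (lst.drop i).takeWhile (fun v => v == 0) = List.replicate k0 (0 : Int) := by
      rw [List.eq_replicate_iff]
      refine ⟨rfl, ?_⟩
      intro b hb
      have hb' := List.mem_takeWhile_imp hb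
      simpa using hb'
    have hdw : (lst.drop i).dropWhile (fun v => v == 0) = lst.drop (i + k0) := by
      have h1 : lst.drop (i + k0) = (lst.drop i).drop k0 := by rw [List.drop_drop]
      rw [h1]
      conv_rhs =>
        rw [← List.takeWhile_append_dropWhile (p := fun v : Int => v == 0) (l := lst.drop i)]
      rw [List.drop_left' rfl]
    rw [rpeakLoop, dif_pos hi, hsz]
    by_cases h2 : i + k0 < lst.length
    case neg =>
      rw [dif_neg (by omega)]
      have hrep : lst.drop i = List.replicate (lst.length - i) (0 : Int) := by
        have hlen' : ((lst.drop i).takeWhile (fun v => v == 0)).length = (lst.drop i).length := by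
          rw [List.length_drop]; omega
        have heq := (List.takeWhile_prefix (l := lst.drop i)
          (fun v : Int => v == 0)).eq_of_length hlen'
        rw [← heq, htw]
        congr 1
        omega
      rw [hrep, goAlt_replicate, ← hdrop, List.take_append_drop]
    case pos =>
      rw [dif_pos (by omega)]
      have hne : lst.drop (i + k0) ≠ [] := by
        intro hc
        have := congrArg List.length hc
        rw [List.length_drop] at this
        simp at this
        omega
      obtain ⟨x, xs, hxe⟩ : ∃ x xs, lst.drop (i + k0) = x :: xs := by
        cases hcc : lst.drop (i + k0) with
        | nil => exact absurd hcc hne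
        | cons a b => exact ⟨a, b, rfl⟩
      have hdwc : (lst.drop i).dropWhile (fun v : Int => v == 0) = x :: xs := by
        rw [hdw, hxe]
      have hx0 : ¬ x = 0 := by
        have hne' : (lst.drop i).dropWhile (fun v : Int => v == 0) ≠ [] := by
          rw [hdwc]; exact List.cons_ne_nil _ _
        have hh := List.head_dropWhile_not (fun v : Int => v == 0) hne'
        simp [hdwc] at hh
        exact hh
      have hcons := List.drop_eq_getElem_cons h2
      have hxg : lst[i + k0] = x := by
        rw [hxe] at hcons
        exact (List.cons_eq_cons.mp hcons.symm).1
      have hxs : xs = lst.drop (i + k0 + 1) := by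
        rw [hxe] at hcons
        exact (List.cons_eq_cons.mp hcons).2
      have hgd : lst.getD (i + k0) 0 = x := by
        rw [List.getD_eq_getElem lst 0 h2, hxg]
      have hxslen : xs.length = lst.length - (i + k0 + 1) := by
        rw [hxs, List.length_drop]
      have htwle : (xs.takeWhile (fun v => !(v == 0))).length ≤ xs.length :=
        (List.takeWhile_prefix _).length_le
      -- findMax over the run starting at i + k0
      have hfm : findMax lst (i + k0) (lst.getD (i + k0) 0) =
          (i + k0 + ((xs.takeWhile (fun v => !(v == 0))).length + 1),
           List.foldl max x (xs.takeWhile (fun v => !(v == 0)))) := by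
        rw [findMax_eq, hxe, List.takeWhile_cons]
        norm_num [hx0]
        have hgE : lst[i + k0]?.getD 0 = x := by
          rw [List.getElem?_eq_getElem h2]
          simpa using hxg
        rw [hgE, max_self]
      rw [hfm]
      set tw := xs.takeWhile (fun v => !(v == 0)) with htwdef
      set m := List.foldl max x tw with hmdef
      -- the run segment is exactly x :: tw
      have hseg : (lst.drop (i + k0)).take (tw.length + 1) = x :: tw := by
        have hpref : (x :: tw) <+: (x :: xs) := by
          have : (x :: xs).takeWhile (fun v => !(v == 0)) = x :: tw := by
            rw [List.takeWhile_cons]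
            simp [hx0, htwdef]
          rw [← this]
          exact List.takeWhile_prefix _
        rw [hxe]
        have := List.prefix_iff_eq_take.mp hpref
        simpa using this.symm
      have hsr : setRun res lst (i + k0) (i + k0 + (tw.length + 1)) m =
          res.take (i + k0) ++ (x :: tw).map (fun v => if v ≠ m then 0 else m) ++
            res.drop (i + k0 + (tw.length + 1)) := by
        rw [setRun_eq (tw.length + 1) res lst (i + k0) m (by omega) (by omega), hseg]
      rw [hsr]
      -- invariants for the recursive call at stop = i + k0 + (tw.length + 1)
      have hdropstop : res.drop (i + k0 + (tw.length + 1)) =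
          List.replicate (lst.length - (i + k0 + (tw.length + 1))) (0 : Int) := by
        have h1 : res.drop (i + k0 + (tw.length + 1)) =
            (res.drop i).drop (k0 + (tw.length + 1)) := by
          rw [List.drop_drop]; congr 1; omega
        rw [h1, hdrop, List.drop_replicate]
        congr 1
        omega
      have hlen2 : (res.take (i + k0) ++ (x :: tw).map (fun v => if v ≠ m then 0 else m) ++
          res.drop (i + k0 + (tw.length + 1))).length = lst.length := by
        simp only [List.length_append, List.length_take, List.length_map, List.length_cons,
          List.length_drop]
        omega
      have hdrop2 : (res.take (i + k0) ++ (x :: tw).map (fun v => if v ≠ m then 0 else m) ++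
          res.drop (i + k0 + (tw.length + 1))).drop (i + k0 + (tw.length + 1)) =
          List.replicate (lst.length - (i + k0 + (tw.length + 1))) (0 : Int) := by
        rw [List.drop_left' (by
          simp only [List.length_append, List.length_take, List.length_map, List.length_cons]
          omega)]
        exact hdropstop
      rw [ih _ (i + k0 + (tw.length + 1)) (by omega) hlen2 hdrop2]
      -- take stop of the updated result
      rw [List.take_left' (by
        simp only [List.length_append, List.length_take, List.length_map, List.length_cons]
        omega)]
      -- res.take (i + k0) = res.take i ++ replicate k0 0
      have hresplit : res.take (i + k0) = res.take i ++ List.replicate k0 (0 : Int) := by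
        conv_lhs => rw [← List.take_append_drop i res]
        rw [List.take_append]
        have hli : (res.take i).length = i := by
          rw [List.length_take]; omega
        rw [hli, List.take_take, hdrop, List.take_replicate]
        congr 1
        · congr 1; omega
        · congr 1; omega
      -- the two per-element write functions agree
      have hfun : (fun v : Int => if v ≠ m then 0 else m) = (fun v => if v = m then m else 0) := by
        funext v
        by_cases hv : v = m <;> simp [hv]
      -- goAlt decomposition of the tail
      have hdw1 : xs.dropWhile (fun v => !(v == 0)) = lst.drop (i + k0 + (tw.length + 1)) := by
        have h1 : xs.drop tw.length = xs.dropWhile (fun v => !(v == 0)) := by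
          conv_lhs =>
            rw [show xs = xs.takeWhile (fun v => !(v == 0)) ++
              xs.dropWhile (fun v => !(v == 0)) from (List.takeWhile_append_dropWhile).symm]
          rw [List.drop_left' (by rw [htwdef])]
        rw [← h1, hxs, List.drop_drop]
        congr 1
        omega
      have hgo : goAlt (lst.drop i) = List.replicate k0 (0 : Int) ++
          ((x :: tw).map (fun v => if v = m then m else 0) ++
            goAlt (lst.drop (i + k0 + (tw.length + 1)))) := by
        rw [goAlt_run (lst.drop i), htw, hdwc]
        congr 1
        rw [goAlt]
        simp only [if_neg hx0]
        rw [← htwdef, ← hmdef, hdw1]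
      rw [hgo, hresplit, hfun]
      simp [List.append_assoc]

-- ---- B side ----

-- output of pass 2 over l with dict d, starting rid r and empty accumulator
def mgo (d : PySem.Dict Int Int) (l : List Int) (r : Int) : List Int :=
  (l.foldl (mapStep d) ([], r)).1

theorem mfold_acc (d : PySem.Dict Int Int) (l : List Int) : ∀ (res : List Int) (r : Int),
    l.foldl (mapStep d) (res, r) =
      (res ++ mgo d l r, (l.foldl (mapStep d) ([], r)).2) := by
  induction l with
  | nil => intro res r; simp [mgo]
  | cons v t ih =>
    intro res r
    by_cases hv : v = 0
    · simp only [List.foldl_cons, mapStep, if_pos hv, mgo]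
      rw [ih (res ++ [0]) (r + 1), ih ([] ++ [0]) (r + 1)]
      simp [List.append_assoc]
    · simp only [List.foldl_cons, mapStep, if_neg hv, mgo]
      rw [ih (res ++ [if v = d.getD r 0 then v else 0]) r,
        ih ([] ++ [if v = d.getD r 0 then v else 0]) r]
      simp [List.append_assoc]

theorem mgo_cons_zero (d : PySem.Dict Int Int) (t : List Int) (r : Int) :
    mgo d (0 :: t) r = 0 :: mgo d t (r + 1) := by
  have h0 : mapStep d ([], r) 0 = ([0], r + 1) := by norm_num [mapStep]
  simp only [mgo, List.foldl_cons, h0]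
  rw [mfold_acc d t [0] (r + 1)]
  simp [mgo]

theorem mgo_cons_nonzero (d : PySem.Dict Int Int) (v : Int) (t : List Int) (r : Int)
    (hv : v ≠ 0) :
    mgo d (v :: t) r = (if v = d.getD r 0 then v else 0) :: mgo d t r := by
  have h0 : mapStep d ([], r) v = ([if v = d.getD r 0 then v else 0], r) := by
    simp [mapStep, hv]
  simp only [mgo, List.foldl_cons, h0]
  rw [mfold_acc d t [if v = d.getD r 0 then v else 0] r]
  simp [mgo]

-- pass 1 over a nonzero run: only key r changes, and it ends at the run's max
theorem build_run (tw : List Int) : ∀ (d : PySem.Dict Int Int) (r cur : Int),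
    (∀ v ∈ tw, v ≠ 0) → d.get? r = some cur →
    (tw.foldl buildStep (d, r)).2 = r ∧
    (tw.foldl buildStep (d, r)).1.get? r = some (tw.foldl max cur) ∧
    (∀ k, k ≠ r → (tw.foldl buildStep (d, r)).1.get? k = d.get? k) := by
  induction tw with
  | nil => intro d r cur _ hg; simpa using hg
  | cons v t ih =>
    intro d r cur hnz hg
    have hv : v ≠ 0 := hnz v (List.mem_cons_self ..)
    have hc : d.contains r = true := by
      rw [PySem.Dict.contains_eq_isSome_get?, hg]; rfl
    have hgd : d.getD r 0 = cur := PySem.Dict.getD_of_get?_eq_some d 0 hg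
    by_cases hlt : cur < v
    · have hbs : buildStep (d, r) v = (d.insert r v, r) := by
        simp [buildStep, hv, hc, hgd, hlt]
      simp only [List.foldl_cons, hbs]
      have hg' : (d.insert r v).get? r = some v := PySem.Dict.get?_insert_self ..
      obtain ⟨h1, h2, h3⟩ := ih (d.insert r v) r v (fun w hw => hnz w (List.mem_cons_of_mem _ hw)) hg'
      refine ⟨h1, ?_, fun k hk => ?_⟩
      · rw [h2]; congr 2; omega
      · rw [h3 k hk, PySem.Dict.get?_insert_of_ne _ _ hk]
    · have hbs : buildStep (d, r) v = (d, r) := by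
        simp [buildStep, hv, hc, hgd, hlt]
      simp only [List.foldl_cons, hbs]
      obtain ⟨h1, h2, h3⟩ := ih d r cur (fun w hw => hnz w (List.mem_cons_of_mem _ hw)) hg
      refine ⟨h1, ?_, h3⟩
      rw [h2]; congr 2; omega

-- main simultaneous lemma: for any suffix l starting at run id r, with all recorded keys < r,
-- pass 1 leaves keys < r untouched and pass 2 over l with the resulting dict yields goAlt l
theorem build_map_goAlt (n : Nat) : ∀ (l : List Int) (d : PySem.Dict Int Int) (r : Int),
    l.length ≤ n →
    (∀ k, d.contains k = true → k < r) →
    (∀ k, k < r → (l.foldl buildStep (d, r)).1.get? k = d.get? k) ∧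
    mgo (l.foldl buildStep (d, r)).1 l r = goAlt l := by
  induction n with
  | zero =>
    intro l d r hl _
    match l with
    | [] => exact ⟨fun k _ => rfl, by simp [mgo, goAlt_nil]⟩
    | x :: xs => simp at hl
  | succ n ih =>
    intro l d r hl hkeys
    match l with
    | [] => exact ⟨fun k _ => rfl, by simp [mgo, goAlt_nil]⟩
    | x :: t =>
      by_cases hx : x = 0
      · subst hx
        have h0 : buildStep (d, r) 0 = (d, r + 1) := by norm_num [buildStep]
        simp only [List.foldl_cons, h0]
        obtain ⟨ha, hb⟩ := ih t d (r + 1) (by simpa using hl)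
          (fun k hk => lt_trans (hkeys k hk) (by omega))
        refine ⟨fun k hk => ha k (by omega), ?_⟩
        rw [mgo_cons_zero, hb, goAlt_zero_cons]
      · -- x starts a nonzero run: split t into the run tail tw and the rest
        set tw := t.takeWhile (fun v => !(v == 0)) with htwdef
        have htwnz : ∀ v ∈ tw, v ≠ 0 := by
          intro v hv
          have := List.mem_takeWhile_imp hv
          simpa using this
        have hcr : d.contains r = false := by
          cases hcc : d.contains r with
          | false => rfl
          | true => exact absurd (hkeys r hcc) (lt_irrefl r)
        -- first step of pass 1 at x
        have hstep1 : buildStep (d, r) x = (d.insert r x, r) := by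
          simp [buildStep, hx, hcr]
        set m := tw.foldl max x with hmdef
        obtain ⟨hr2, hrget, hrother⟩ :=
          build_run tw (d.insert r x) r x htwnz (PySem.Dict.get?_insert_self ..)
        set d1 := (tw.foldl buildStep (d.insert r x, r)).1 with hd1def
        have hfold_run : (x :: tw).foldl buildStep (d, r) = (d1, r) := by
          simp only [List.foldl_cons, hstep1]
          exact Prod.ext rfl hr2
        have hd1r : d1.get? r = some m := hrget
        have hd1other : ∀ k, k ≠ r → d1.get? k = d.get? k := by
          intro k hk
          rw [hrother k hk, PySem.Dict.get?_insert_of_ne _ _ hk]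
        have hfold_l : (x :: t).foldl buildStep (d, r) =
            (t.dropWhile (fun v => !(v == 0))).foldl buildStep (d1, r) := by
          conv_lhs =>
            rw [show x :: t = (x :: tw) ++ t.dropWhile (fun v => !(v == 0)) from by
              rw [List.cons_append, htwdef, List.takeWhile_append_dropWhile]]
          rw [List.foldl_append, hfold_run]
        have hd1keys : ∀ k, d1.contains k = true → k < r + 1 := by
          intro k hck
          rw [PySem.Dict.contains_eq_isSome_get?] at hck
          by_cases hk : k = r
          · omega
          · rw [hd1other k hk] at hck
            have hck' : d.contains k = true := by
              rw [PySem.Dict.contains_eq_isSome_get?]; exact hck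
            have := hkeys k hck'
            omega
        -- rest is empty or starts with a zero
        match hrc : t.dropWhile (fun v => !(v == 0)) with
        | [] =>
          rw [hrc] at hfold_l
          rw [hfold_l]
          simp only [List.foldl_nil]
          have hteq : t = tw := by
            conv_lhs => rw [← List.takeWhile_append_dropWhile (p := fun v : Int => !(v == 0))
              (l := t)]
            rw [hrc, List.append_nil, htwdef]
          refine ⟨fun k hk => hd1other k (by omega), ?_⟩
          have hgd1 : d1.getD r 0 = m := PySem.Dict.getD_of_get?_eq_some d1 0 hd1r
          have hmap_run : ∀ (u : List Int), (∀ v ∈ u, v ≠ 0) →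
              mgo d1 u r = u.map (fun v => if v = m then m else 0) := by
            intro u hu
            induction u with
            | nil => simp [mgo]
            | cons w ws ihw =>
              rw [mgo_cons_nonzero d1 w ws r (hu w (List.mem_cons_self ..)),
                ihw (fun z hz => hu z (List.mem_cons_of_mem _ hz))]
              rw [hgd1, List.map_cons]
              congr 1
              by_cases hw : w = m <;> simp [hw]
          rw [goAlt]
          simp only [if_neg hx]
          rw [show t.dropWhile (fun v => !(v == 0)) = [] from hrc, goAlt_nil, List.append_nil]
          rw [show mgo (List.foldl buildStep (d.insert r x, r) tw).1 (x :: t) r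
              = mgo d1 (x :: tw) r from by rw [← hd1def, hteq]]
          rw [hmap_run (x :: tw) (fun v hv => by
            rcases List.mem_cons.mp hv with h | h
            · subst h; exact hx
            · exact htwnz v h)]
        | y :: rest' =>
          have hy : y = 0 := by
            have hne' : t.dropWhile (fun v : Int => !(v == 0)) ≠ [] := by
              rw [hrc]; exact List.cons_ne_nil _ _
            have hh := List.head_dropWhile_not (fun v : Int => !(v == 0)) hne'
            simp [hrc] at hh
            exact hh
          subst hy
          rw [hrc] at hfold_l
          rw [hfold_l]
          have h0 : buildStep (d1, r) 0 = (d1, r + 1) := by norm_num [buildStep]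
          simp only [List.foldl_cons, h0]
          have hlen' : rest'.length ≤ n := by
            have h1 : t.length ≤ n := by simpa using hl
            have h2 : (t.dropWhile (fun v : Int => !(v == 0))).length ≤ t.length :=
              List.length_dropWhile_le _ _
            rw [hrc] at h2
            simp at h2
            omega
          obtain ⟨ha, hb⟩ := ih rest' d1 (r + 1) hlen' hd1keys
          set D := (rest'.foldl buildStep (d1, r + 1)).1 with hDdef
          have hDr : D.get? r = some m := by rw [ha r (by omega)]; exact hd1r
          have hDother : ∀ k, k < r → D.get? k = d.get? k := by
            intro k hk
            rw [ha k (by omega), hd1other k (by omega)]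
          refine ⟨hDother, ?_⟩
          -- pass 2 over l = x :: tw ++ 0 :: rest'
          have hgdD : D.getD r 0 = m := PySem.Dict.getD_of_get?_eq_some D 0 hDr
          have hmap_run : ∀ (u : List Int), (∀ v ∈ u, v ≠ 0) → ∀ (suf : List Int),
              mgo D (u ++ suf) r = u.map (fun v => if v = m then m else 0) ++ mgo D suf r := by
            intro u hu
            induction u with
            | nil => simp
            | cons w ws ihw =>
              intro suf
              rw [List.cons_append,
                mgo_cons_nonzero D w (ws ++ suf) r (hu w (List.mem_cons_self ..)),
                ihw (fun z hz => hu z (List.mem_cons_of_mem _ hz)) suf]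
              rw [hgdD, List.map_cons, List.cons_append]
              congr 1
              by_cases hw : w = m <;> simp [hw]
          have hlshape : x :: t = (x :: tw) ++ (0 :: rest') := by
            rw [List.cons_append]
            congr 1
            conv_lhs => rw [← List.takeWhile_append_dropWhile (p := fun v : Int => !(v == 0))
              (l := t)]
            rw [hrc, htwdef]
          rw [goAlt]
          simp only [if_neg hx]
          rw [show t.dropWhile (fun v => !(v == 0)) = 0 :: rest' from hrc, goAlt_zero_cons]
          conv_lhs => rw [hlshape]
          rw [hmap_run (x :: tw) (fun v hv => by
            rcases List.mem_cons.mp hv with h | h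
            · subst h; exact hx
            · exact htwnz v h) (0 :: rest')]
          rw [mgo_cons_zero, hb]

-- ===== VERDICT (by name: the statement is the Claim_ definition above) =====
theorem rpeak_spec : Claim_equal_rpeak := by
  intro lst _
  unfold Spec_rpeak
  have hA : rpeak lst = goAlt lst := by
    have := rpeakLoop_eq lst lst.length (List.replicate lst.length 0) 0
      (by omega) (by simp) (by simp)
    simpa [rpeak] using this
  have hB : rpeak_alt lst = goAlt lst := by
    have h := build_map_goAlt lst.length lst PySem.Dict.empty 0 (le_refl _)
      (fun k hk => by rw [PySem.Dict.contains_empty] at hk; exact absurd hk (by simp))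
    exact h.2.symm ▸ rfl
  rw [hA, hB]
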